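-- pv_equiv track=rewrite | github.com/ckh9723/Cicada-Master | ClassifyScreen.py | compress_file_path
-- ===== SOURCE A (Python) =====
-- def compress_file_path(file_path):
--     folder_count = 0
--     for i in range(len(file_path) - 1, -1, -1):
--         if file_path[i] == '/':
--             if folder_count == 1:
--                 file_path = '~' + file_path[i:]
--                 break
--             else:
--                 folder_count += 1
--     return file_path
-- ===== SOURCE B (Python) =====
-- def compress_file_path(file_path):
--     parts = file_path.split('/')
--     if len(parts) < 3:
--         return file_path
--     return '~/' + '/'.join(parts[-2:])
-- ===== Notes on version B (the rewrite author's own statement) =====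
-- stated objective: faster
-- what changed: A scans the string backward character by character in Python counting slashes and breaks at the second-last slash; B tokenizes forward with str.split and, when there are at least three parts, rebuilds the result from the last two parts joined, pushing the per-character work into C-level built-ins.
import Mathlib
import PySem

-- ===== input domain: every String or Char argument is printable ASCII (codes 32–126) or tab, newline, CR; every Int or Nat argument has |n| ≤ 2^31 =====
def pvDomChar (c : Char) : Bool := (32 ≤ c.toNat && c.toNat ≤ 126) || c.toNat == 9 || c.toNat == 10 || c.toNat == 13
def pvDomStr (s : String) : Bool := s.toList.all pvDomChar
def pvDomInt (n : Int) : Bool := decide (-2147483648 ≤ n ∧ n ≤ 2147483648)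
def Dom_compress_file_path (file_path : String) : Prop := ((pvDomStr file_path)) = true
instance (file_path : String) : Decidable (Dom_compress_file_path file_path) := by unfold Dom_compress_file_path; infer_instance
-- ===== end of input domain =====

-- B replaces A's backward character scan (counter + break) with split-on-'/' and
-- reconstruction from the last two parts (measured faster at a constant factor); objective: faster.

-- ===== PORT A =====
-- the for-loop over range(len-1,-1,-1) with its break: 'some r' = the loop broke
-- with file_path reassigned to r, 'none' = the loop fell through
def compAloop (s : List Char) : List Int → Nat → Option (List Char)
  | [], _ => none
  | i :: rest, folder_count =>
    if PySem.List.pyGet? s i = some '/' then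
      if folder_count = 1 then some ('~' :: PySem.List.slice s (some i) none)
      else compAloop s rest (folder_count + 1)
    else compAloop s rest folder_count

def compress_file_path (file_path : String) : String :=
  let s := file_path.toList
  match compAloop s (PySem.List.pyRange ((s.length : Int) - 1) (-1) (-1)) 0 with
  | some r => String.ofList r
  | none => file_path

-- ===== PORT B =====
def compress_file_path_alt (file_path : String) : String :=
  let parts := PySem.Chars.splitOn file_path.toList ['/']
  if parts.length < 3 then file_path
  else String.ofList (['~', '/'] ++ PySem.Chars.join ['/'] (PySem.List.slice parts (some (-2)) none))

-- ===== PRECONDITION & SPEC =====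
def Spec_compress_file_path (file_path : String) (out : String) : Prop := out = compress_file_path_alt file_path
instance (file_path : String) (out : String) : Decidable (Spec_compress_file_path file_path out) := by unfold Spec_compress_file_path; infer_instance

-- ===== CLAIM (what is proved, stated in full; the proofs are below) =====
def Claim_equal_compress_file_path : Prop := ∀ (file_path : String), Dom_compress_file_path file_path → Spec_compress_file_path file_path (compress_file_path file_path)

-- ===== LEMMAS AND PROOFS =====

-- proof-side: the descending index list [lo+len-1, …, lo]
def pvDesc (lo : Nat) : Nat → List Int
  | 0 => []
  | n + 1 => ((lo + n : Nat) : Int) :: pvDesc lo n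

-- proof-side: A's loop with the counter made explicit in the result
def pvScanC (s : List Char) : List Int → Nat → Option (List Char) × Nat
  | [], cnt => (none, cnt)
  | i :: rest, cnt =>
    if PySem.List.pyGet? s i = some '/' then
      if cnt = 1 then (some ('~' :: PySem.List.slice s (some i) none), cnt)
      else pvScanC s rest (cnt + 1)
    else pvScanC s rest cnt

-- proof-side: structural right-to-left scan (tail = higher indices, scanned first)
def pvScan2 : List Char → Nat → Option (List Char) × Nat
  | [], cnt => (none, cnt)
  | c :: t, cnt =>
    match pvScan2 t cnt with
    | (some r, n) => (some r, n)
    | (none, n) =>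
      if c = '/' then (if n = 1 then (some (c :: t), n) else (none, n + 1))
      else (none, n)

-- proof-side: structural split on '/'
def pvSplit : List Char → List (List Char)
  | [] => [[]]
  | c :: t =>
    if c = '/' then [] :: pvSplit t
    else match pvSplit t with
      | [] => [[c]]
      | p :: ps => (c :: p) :: ps

def pvJoin : List (List Char) → List Char
  | [] => []
  | [p] => p
  | p :: ps => p ++ '/' :: pvJoin ps

lemma pvDesc_closed (lo : Nat) : ∀ n, pvDesc lo n = (List.range n).map (fun k : Nat => (lo : Int) + (n : Int) - 1 - (k : Int)) := by
  intro n
  induction n with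
  | zero => simp [pvDesc]
  | succ n ih =>
    simp only [pvDesc, ih, List.range_succ_eq_map, List.map_cons, List.map_map]
    congr 1
    · push_cast; ring
    apply List.map_congr_left
    intro k _
    simp only [Function.comp]
    push_cast; ring

lemma pyRange_eq_pvDesc (n : Nat) : PySem.List.pyRange ((n : Int) - 1) (-1) (-1) = pvDesc 0 n := by
  rw [PySem.List.pyRange.eq_def, pvDesc_closed]
  by_cases h : 0 < n
  · have h1 : (-1 : Int) < (n : Int) - 1 := by omega
    simp only [if_neg (by norm_num : ¬ (-1:Int) = 0), if_neg (by norm_num : ¬ (0:Int) < -1), if_pos h1]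
    have h2 : ((n:Int) - 1 - -1 + - -1 - 1) / - -1 = (n : Int) := by norm_num
    rw [h2, Int.toNat_natCast]
    apply List.map_congr_left
    intro k _
    push_cast; ring
  · have hn : n = 0 := by omega
    subst hn
    norm_num

lemma pvDesc_succ (lo : Nat) : ∀ n, pvDesc lo (n + 1) = pvDesc (lo + 1) n ++ [(lo : Int)] := by
  intro n
  induction n with
  | zero => simp [pvDesc]
  | succ n ih =>
    have h : pvDesc lo (n + 1 + 1) = ((lo + (n+1) : Nat) : Int) :: pvDesc lo (n + 1) := rfl
    rw [h, ih]
    simp only [pvDesc, List.cons_append]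
    congr 1
    push_cast; ring

lemma compAloop_eq_pvScanC (s : List Char) : ∀ idxs cnt, compAloop s idxs cnt = (pvScanC s idxs cnt).1 := by
  intro idxs
  induction idxs with
  | nil => intro cnt; rfl
  | cons i rest ih =>
    intro cnt
    simp only [compAloop, pvScanC]
    split_ifs with h1 h2
    · rfl
    · exact ih (cnt + 1)
    · exact ih cnt

lemma pvScanC_append (s : List Char) : ∀ xs ys cnt,
    pvScanC s (xs ++ ys) cnt =
      match pvScanC s xs cnt with
      | (some r, n) => (some r, n)
      | (none, n) => pvScanC s ys n := by
  intro xs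
  induction xs with
  | nil => intro ys cnt; rfl
  | cons i rest ih =>
    intro ys cnt
    simp only [List.cons_append, pvScanC]
    split_ifs with h1 h2
    · rfl
    · exact ih ys (cnt + 1)
    · exact ih ys cnt

lemma pvScanC_eq_pvScan2 : ∀ (suf pre : List Char) (cnt : Nat),
    pvScanC (pre ++ suf) (pvDesc pre.length suf.length) cnt =
      ((pvScan2 suf cnt).1.map (fun r => '~' :: r), (pvScan2 suf cnt).2) := by
  intro suf
  induction suf with
  | nil => intro pre cnt; rfl
  | cons c t ih =>
    intro pre cnt
    have hlen : (c :: t).length = t.length + 1 := rfl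
    rw [hlen, pvDesc_succ, pvScanC_append]
    have hre : pre ++ c :: t = (pre ++ [c]) ++ t := by simp
    have hlen2 : (pre ++ [c]).length = pre.length + 1 := by simp
    rw [hre]
    rw [← hlen2, ih (pre ++ [c]) cnt]
    have hget : PySem.List.pyGet? ((pre ++ [c]) ++ t) ((pre.length : Nat) : Int) = some c := by
      rw [PySem.List.pyGet?_natCast]
      rw [List.append_assoc]
      rw [List.getElem?_append_right (le_refl pre.length)]
      simp
    have hslice : PySem.List.slice ((pre ++ [c]) ++ t) (some ((pre.length : Nat) : Int)) none = c :: t := by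
      rw [PySem.List.slice_from_natCast, List.append_assoc, List.drop_left]
      rfl
    simp only [pvScan2]
    cases h2 : pvScan2 t cnt with
    | mk r n =>
      cases r with
      | some v => simp
      | none =>
        simp only [Option.map_none]
        simp only [pvScanC, hget, hslice]
        by_cases hc : c = '/'
        · subst hc
          by_cases hn : n = 1
          · subst hn; simp
          · simp [hn]
        · simp [hc]

lemma pvSplit_ne_nil (s : List Char) : pvSplit s ≠ [] := by
  cases s with
  | nil => simp [pvSplit]
  | cons c t =>
    simp only [pvSplit]
    split_ifs
    · simp
    · cases h : pvSplit t <;> simp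

lemma splitOn_go_single : ∀ (l : List Char) (fuel : Nat), l.length < fuel → ∀ cur acc,
    PySem.Chars.splitOn.go ['/'] fuel l cur acc =
      acc.reverse ++ (match pvSplit l with
        | [] => []
        | p :: ps => (cur.reverse ++ p) :: ps) := by
  intro l
  induction l with
  | nil =>
    intro fuel hf cur acc
    obtain ⟨f, rfl⟩ : ∃ f, fuel = f + 1 := ⟨fuel - 1, by omega⟩
    rw [PySem.Chars.splitOn.go.eq_def]
    simp [pvSplit]
  | cons c rest ih =>
    intro fuel hf cur acc
    obtain ⟨f, rfl⟩ : ∃ f, fuel = f + 1 := ⟨fuel - 1, by omega⟩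
    rw [PySem.Chars.splitOn.go.eq_def]
    simp only []
    by_cases hc : c = '/'
    · subst hc
      have hpre : List.isPrefixOf ['/'] ('/' :: rest) = true := by
        simp [List.isPrefixOf]
      rw [if_pos hpre]
      have hdrop : List.drop (['/'] : List Char).length ('/' :: rest) = rest := rfl
      rw [hdrop, ih f (by simpa using hf) [] (cur.reverse :: acc)]
      simp only [pvSplit]
      cases h : pvSplit rest with
      | nil => exact absurd h (pvSplit_ne_nil rest)
      | cons p ps => simp
    · have hpre : List.isPrefixOf ['/'] (c :: rest) = false := by
        simp [List.isPrefixOf]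
        intro h; exact absurd h.symm hc
      rw [if_neg (by simp [hpre])]
      rw [ih f (by simpa using hf) (c :: cur) acc]
      simp only [pvSplit, if_neg hc]
      cases h : pvSplit rest with
      | nil => exact absurd h (pvSplit_ne_nil rest)
      | cons p ps => simp

lemma splitOn_eq_pvSplit (s : List Char) : PySem.Chars.splitOn s ['/'] = pvSplit s := by
  show PySem.Chars.splitOn.go ['/'] (s.length + 1) s [] [] = pvSplit s
  rw [splitOn_go_single s (s.length + 1) (by omega) [] []]
  cases h : pvSplit s with
  | nil => exact absurd h (pvSplit_ne_nil s)
  | cons p ps => simp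

lemma pvSplit_length (s : List Char) : (pvSplit s).length = s.count '/' + 1 := by
  induction s with
  | nil => simp [pvSplit]
  | cons c t ih =>
    simp only [pvSplit]
    by_cases hc : c = '/'
    · subst hc
      simp [ih]
    · rw [if_neg hc]
      cases h : pvSplit t with
      | nil => exact absurd h (pvSplit_ne_nil t)
      | cons p ps =>
        rw [h] at ih
        simp only [List.length_cons] at ih ⊢
        rw [List.count_cons]
        simp [hc, ih]

lemma pvJoin_pvSplit : ∀ s, pvJoin (pvSplit s) = s := by
  intro s
  induction s with
  | nil => rfl
  | cons c t ih =>
    simp only [pvSplit]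
    by_cases hc : c = '/'
    · subst hc
      rw [if_pos rfl]
      cases h : pvSplit t with
      | nil => exact absurd h (pvSplit_ne_nil t)
      | cons p ps =>
        rw [h] at ih
        simp only [pvJoin]
        cases ps with
        | nil => simp only [pvJoin] at ih ⊢; rw [ih]; simp
        | cons q qs => rw [ih]; simp
    · rw [if_neg hc]
      cases h : pvSplit t with
      | nil => exact absurd h (pvSplit_ne_nil t)
      | cons p ps =>
        rw [h] at ih
        cases ps with
        | nil => simp only [pvJoin] at ih ⊢; rw [ih]
        | cons q qs =>
          simp only [pvJoin] at ih ⊢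
          rw [List.cons_append, ih]

lemma pvMain : ∀ s : List Char,
    (2 ≤ s.count '/' →
      ∃ p q, (pvSplit s).drop ((pvSplit s).length - 2) = [p, q] ∧
        pvScan2 s 0 = (some ('/' :: (p ++ '/' :: q)), 1)) ∧
    (s.count '/' < 2 → pvScan2 s 0 = (none, s.count '/')) := by
  intro s
  induction s with
  | nil =>
    constructor
    · intro h; simp at h
    · intro _; rfl
  | cons c t ih =>
    obtain ⟨ih2, ih1⟩ := ih
    have hcount : (c :: t).count '/' = t.count '/' + (if c = '/' then 1 else 0) := by
      by_cases hc : c = '/' <;> simp [hc]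
    have hcount' : ∀ (hc : c = '/'), (c :: t).count '/' = t.count '/' + 1 := by
      intro hc; rw [hcount, if_pos hc]
    have hcount'' : ∀ (hc : ¬ c = '/'), (c :: t).count '/' = t.count '/' := by
      intro hc; rw [hcount, if_neg hc]; omega
    by_cases hk : 2 ≤ t.count '/'
    · -- inner scan already found the second slash
      obtain ⟨p, q, hdrop, hscan⟩ := ih2 hk
      constructor
      · intro _
        refine ⟨p, q, ?_, ?_⟩
        · -- the last two parts are unchanged by prepending / extending the head part
          have hlen : 3 ≤ (pvSplit t).length := by rw [pvSplit_length]; omega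
          simp only [pvSplit]
          by_cases hc : c = '/'
          · rw [if_pos hc]
            rw [List.length_cons]
            have h1 : (pvSplit t).length + 1 - 2 = ((pvSplit t).length - 2) + 1 := by omega
            rw [h1, List.drop_succ_cons, hdrop]
          · rw [if_neg hc]
            cases hsp : pvSplit t with
            | nil => exact absurd hsp (pvSplit_ne_nil t)
            | cons p0 ps =>
              rw [hsp] at hdrop
              rw [hsp, List.length_cons] at hlen
              simp only [List.length_cons] at hdrop ⊢
              have h1 : ps.length + 1 - 2 = (ps.length - 2) + 1 := by omega
              rw [h1, List.drop_succ_cons] at hdrop ⊢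
              exact hdrop
        · simp only [pvScan2, hscan]
      · intro habs
        have h2 : 2 ≤ (c :: t).count '/' := by
          by_cases hc : c = '/'
          · rw [hcount' hc]; omega
          · rw [hcount'' hc]; omega
        omega
    · -- inner scan fell through with count t.count '/'
      have hs1 : pvScan2 t 0 = (none, t.count '/') := ih1 (by omega)
      by_cases hc : c = '/'
      · subst hc
        by_cases h1 : t.count '/' = 1
        · -- this is the second-last slash: the scan breaks here
          constructor
          · intro _
            have hlen : (pvSplit t).length = 2 := by rw [pvSplit_length]; omega
            obtain ⟨p, q, hpq⟩ : ∃ p q, pvSplit t = [p, q] := by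
              cases hsp : pvSplit t with
              | nil => exact absurd hsp (pvSplit_ne_nil t)
              | cons a l =>
                cases l with
                | nil => rw [hsp] at hlen; simp at hlen
                | cons b l2 =>
                  cases l2 with
                  | nil => exact ⟨a, b, rfl⟩
                  | cons d l3 => rw [hsp] at hlen; simp at hlen
            refine ⟨p, q, ?_, ?_⟩
            · simp [pvSplit, hpq]
            · have ht : t = p ++ '/' :: q := by
                have := pvJoin_pvSplit t
                rw [hpq] at this
                simpa [pvJoin] using this.symm
              simp only [pvScan2, hs1, h1]
              simp [ht]
          · intro habs; rw [hcount' rfl] at habs; omega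
        · -- first slash from the right (or t has none): fall through with count+1
          constructor
          · intro habs; rw [hcount' rfl] at habs; omega
          · intro _
            simp only [pvScan2, hs1]
            simp only [if_neg h1]
            rw [hcount' rfl]
            simp
      · constructor
        · intro habs; rw [hcount'' hc] at habs; omega
        · intro _
          simp only [pvScan2, hs1, if_neg hc]
          rw [hcount'' hc]

-- ===== VERDICT (by name: the statement is the Claim_ definition above) =====
theorem compress_file_path_spec : Claim_equal_compress_file_path := by
  intro fp _hdom
  unfold Spec_compress_file_path compress_file_path compress_file_path_alt
  simp only []
  rw [pyRange_eq_pvDesc, compAloop_eq_pvScanC]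
  have hpre : pvScanC fp.toList (pvDesc 0 fp.toList.length) 0 =
      ((pvScan2 fp.toList 0).1.map (fun r => '~' :: r), (pvScan2 fp.toList 0).2) := by
    have := pvScanC_eq_pvScan2 fp.toList [] 0
    simpa using this
  rw [hpre, splitOn_eq_pvSplit, pvSplit_length]
  by_cases hge : 2 ≤ fp.toList.count '/'
  · obtain ⟨p, q, hdrop, hscan⟩ := (pvMain fp.toList).1 hge
    rw [hscan]
    rw [if_neg (by omega)]
    have hslice : PySem.List.slice (pvSplit fp.toList) (some (-2)) none =
        List.drop ((pvSplit fp.toList).length - 2) (pvSplit fp.toList) :=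
      PySem.List.slice_from_neg_ofNat (pvSplit fp.toList) 2 (by norm_num)
    rw [hslice, hdrop]
    have hjoin : PySem.Chars.join ['/'] [p, q] = p ++ '/' :: q := by
      simp [PySem.Chars.join, List.intercalate]
    rw [hjoin]
    simp
  · rw [(pvMain fp.toList).2 (by omega)]
    rw [if_pos (by omega)]
    simp
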